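-- pv_equiv track=rewrite | github.com/nikita1610/100PythonProblems | Problem100/Day100.py | ValidPair
-- ===== SOURCE A (Python) =====
-- def ValidPair(a, n):
--     	a.sort()
--     	p=0
--     	q=n-1
--     	ans=0
--     	while(p<=q):
--     	    if a[p]+a[q]<=0:
--     	        p+=1
--     	    else:
--     	        ans+=q-p
--     	        q-=1
--     	        #ans+=1
--     	return ans
-- ===== SOURCE B (Python) =====
-- def ValidPair(a, n):
--     a.sort()
--     ans = 0
--     for j in range(n):
--         x = -a[j]
--         lo, hi = 0, j
--         while lo < hi:
--             mid = (lo + hi) // 2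
--             if a[mid] <= x:
--                 lo = mid + 1
--             else:
--                 hi = mid
--         ans += j - lo
--     return ans
-- ===== Notes on version B (the rewrite author's own statement) =====
-- stated objective: alternative
-- what changed: Replaces the two-pointer sweep after the sort with a per-element hand-written binary search: for each j the count of earlier sorted elements exceeding -a[j] is added, so the p/q pointer state disappears.
import Mathlib
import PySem

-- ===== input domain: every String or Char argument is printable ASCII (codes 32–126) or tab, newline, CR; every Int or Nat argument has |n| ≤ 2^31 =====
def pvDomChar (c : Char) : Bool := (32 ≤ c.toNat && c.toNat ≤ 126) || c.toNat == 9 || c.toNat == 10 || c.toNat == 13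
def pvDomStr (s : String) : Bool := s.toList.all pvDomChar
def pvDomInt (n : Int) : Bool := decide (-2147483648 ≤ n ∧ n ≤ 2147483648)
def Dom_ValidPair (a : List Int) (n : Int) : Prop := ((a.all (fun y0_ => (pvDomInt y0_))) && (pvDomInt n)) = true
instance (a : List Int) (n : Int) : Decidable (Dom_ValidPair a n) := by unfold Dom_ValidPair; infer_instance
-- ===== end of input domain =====

-- B replaces A's two-pointer sweep (after the sort) by a per-element binary search over the
-- sorted prefix; equivalence is about the RETURN value only (both Pythons sort `a` in place).

-- ===== PORT A =====
-- A's while loop: p, q pointers, ans accumulator; a[p]/a[q] out of range = IndexError (outside Pre_).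
def ValidPair.loop (s : List Int) (p q ans : Int) : Int :=
  if _h : p ≤ q then
    match PySem.List.pyGet? s p, PySem.List.pyGet? s q with
    | some x, some y =>
      if x + y ≤ 0 then ValidPair.loop s (p + 1) q ans
      else ValidPair.loop s p (q - 1) (ans + (q - p))
    | _, _ => ans   -- Python raises IndexError here; excluded by Pre_
  else ans
  termination_by (q - p + 1).toNat
  decreasing_by all_goals omega

def ValidPair (a : List Int) (n : Int) : Int :=
  let s := PySem.List.sorted a (fun x => x) false   -- a.sort()
  ValidPair.loop s 0 (n - 1) 0

-- ===== PORT B =====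
-- Source B's hand-written bisect-right loop: lo, hi with mid = (lo+hi)//2.
def ValidPair_alt.bs (s : List Int) (x lo hi : Int) : Int :=
  if _h : lo < hi then
    let mid := PySem.Int.floordiv (lo + hi) 2
    match PySem.List.pyGet? s mid with
    | some v => if v ≤ x then ValidPair_alt.bs s x (mid + 1) hi else ValidPair_alt.bs s x lo mid
    | none => lo   -- Python raises IndexError here; excluded by Pre_
  else lo
  termination_by (hi - lo).toNat
  decreasing_by
    all_goals simp only [PySem.Int.floordiv_eq_ediv_of_pos (by omega : (0:Int) < 2)] at *
    all_goals omega

def ValidPair_alt (a : List Int) (n : Int) : Int :=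
  let s := PySem.List.sorted a (fun x => x) false   -- a.sort()
  (PySem.List.pyRange 0 n 1).foldl (fun ans j =>
    match PySem.List.pyGet? s j with
    | some x => ans + (j - ValidPair_alt.bs s (-x) 0 j)
    | none => ans   -- Python raises IndexError here; excluded by Pre_
    ) 0

-- ===== PRECONDITION & SPEC =====
-- Pre_ excludes exactly the inputs where A raises IndexError: n > len(a) makes a[n-1] raise
-- (B raises there too). For n ≤ 0 the loop body never runs, so every n ≤ len(a) is fine.
def Pre_ValidPair (a : List Int) (n : Int) : Prop := n ≤ a.length
instance (a : List Int) (n : Int) : Decidable (Pre_ValidPair a n) := by unfold Pre_ValidPair; infer_instance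
def pvWitness_ValidPair : List Int × Int := ([1, -2, 3], 3)

def Spec_ValidPair (a : List Int) (n : Int) (out : Int) : Prop := out = ValidPair_alt a n
instance (a : List Int) (n : Int) (out : Int) : Decidable (Spec_ValidPair a n out) := by unfold Spec_ValidPair; infer_instance

-- ===== CLAIM (what is proved, stated in full; the proofs are below) =====
def Claim_equal_ValidPair : Prop := ∀ (a : List Int) (n : Int), Dom_ValidPair a n → Pre_ValidPair a n → Spec_ValidPair a n (ValidPair a n)

-- ===== LEMMAS AND PROOFS =====

-- a list whose entries are monotone in the index (what sorting guarantees)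
def PVMono (s : List Int) : Prop := ∀ i j : Nat, i ≤ j → j < s.length → s.getD i 0 ≤ s.getD j 0

lemma pv_mono_sorted (a : List Int) : PVMono (PySem.List.sorted a (fun x => x) false) := by
  intro i j hij hj
  rcases Nat.eq_or_lt_of_le hij with h | h
  · simp [h]
  · have hp := PySem.List.sorted_pairwise a (fun x => x) (κ := Int)
    rw [List.pairwise_iff_getElem] at hp
    have hi : i < (PySem.List.sorted a (fun x => x) false).length := lt_trans h hj
    rw [List.getD_eq_getElem _ 0 hi, List.getD_eq_getElem _ 0 hj]
    exact hp i j hi hj h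

-- pairs (i, j), p ≤ i < j, with positive sum (second index fixed at j)
def pvCnt (s : List Int) (p j : Nat) : Nat :=
  ((Finset.Ico p j).filter (fun i => 0 < s.getD i 0 + s.getD j 0)).card

-- all pairs p ≤ i < j ≤ q with positive sum
def pvTot (s : List Int) (p q : Nat) : Nat := ∑ j ∈ Finset.Ico p (q + 1), pvCnt s p j

lemma pv_loopA_eq (s : List Int) (hM : PVMono s) :
    ∀ (k p q : Nat) (ans : Int), q - p = k → p ≤ q → q < s.length →
      ValidPair.loop s p q ans = ans + pvTot s p q := by
  intro k
  induction k using Nat.strong_induction_on with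
  | _ k ih =>
    intro p q ans hk hpq hq
    have hp : p < s.length := lt_of_le_of_lt hpq hq
    rw [ValidPair.loop, dif_pos (by exact_mod_cast hpq : (p:Int) ≤ q)]
    have hgp : PySem.List.pyGet? s ((p:Nat) : Int) = some s[p] := by simp [pysem, hp]
    have hgq : PySem.List.pyGet? s ((q:Nat) : Int) = some s[q] := by simp [pysem, hq]
    rw [hgp, hgq]
    by_cases hc : s[p] + s[q] ≤ 0
    · simp only [hc, if_pos]
      have htot : pvTot s p q = pvTot s (p+1) q := by
        unfold pvTot
        rw [Finset.sum_eq_sum_Ico_succ_bot (by omega)]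
        have h0 : pvCnt s p p = 0 := by simp [pvCnt]
        rw [h0, Nat.zero_add]
        apply Finset.sum_congr rfl
        intro j hj
        simp only [Finset.mem_Ico] at hj
        have hjlen : j < s.length := by omega
        have hfail : ¬ (0 < s.getD p 0 + s.getD j 0) := by
          have h1 : s.getD j 0 ≤ s.getD q 0 := hM j q (by omega) hq
          have h2 : s.getD p 0 = s[p] := List.getD_eq_getElem s 0 hp
          have h3 : s.getD q 0 = s[q] := List.getD_eq_getElem s 0 hq
          omega
        unfold pvCnt
        have : Finset.Ico p j = insert p (Finset.Ico (p+1) j) :=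
          Eq.symm (Finset.insert_Ico_add_one_left_eq_Ico (by omega))
        rw [this, Finset.filter_insert, if_neg hfail]
      rcases Nat.eq_or_lt_of_le hpq with heq | hlt
      · subst heq
        rw [ValidPair.loop, dif_neg (by omega : ¬ ((p:Int) + 1 ≤ p))]
        have : pvTot s p p = 0 := by simp [pvTot, pvCnt]
        simp [this]
      · have : ((p:Int) + 1) = ((p+1 : Nat) : Int) := by push_cast; ring
        rw [this, ih (q - (p+1)) (by omega) (p+1) q ans rfl (by omega) hq, htot]
    · simp only [hc, if_false]
      rcases Nat.eq_or_lt_of_le hpq with heq | hlt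
      · subst heq
        rw [ValidPair.loop, dif_neg (by omega : ¬ ((p:Int) ≤ p - 1))]
        have : pvTot s p p = 0 := by simp [pvTot, pvCnt]
        simp [this]
      · have hq1 : ((q:Int) - 1) = ((q - 1 : Nat) : Int) := by omega
        rw [hq1, ih (q - 1 - p) (by omega) p (q-1) (ans + ((q:Int) - p)) rfl (by omega) (by omega)]
        have hsplit : pvTot s p q = pvTot s p (q-1) + pvCnt s p q := by
          unfold pvTot
          have h1 : q - 1 + 1 = q := by omega
          rw [h1, Finset.sum_Ico_succ_top (by omega)]
        have hfullc : pvCnt s p q = q - p := by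
          unfold pvCnt
          rw [Finset.filter_true_of_mem, Nat.card_Ico]
          intro i hi
          simp only [Finset.mem_Ico] at hi
          have h1 : s.getD p 0 ≤ s.getD i 0 := hM p i (by omega) (by omega)
          have h2 : s.getD p 0 = s[p] := List.getD_eq_getElem s 0 hp
          have h3 : s.getD q 0 = s[q] := List.getD_eq_getElem s 0 hq
          omega
        rw [hsplit, hfullc]
        push_cast [Nat.sub_add_cancel]
        omega

lemma pv_bs_eq (s : List Int) (hM : PVMono s) (x : Int) :
    ∀ (k lo hi : Nat), hi - lo = k → lo ≤ hi → hi ≤ s.length →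
      ValidPair_alt.bs s x lo hi = lo + ((Finset.Ico lo hi).filter (fun i => s.getD i 0 ≤ x)).card := by
  intro k
  induction k using Nat.strong_induction_on with
  | _ k ih =>
    intro lo hi hk hle hlen
    rcases Nat.eq_or_lt_of_le hle with heq | hlt
    · subst heq
      rw [ValidPair_alt.bs]
      simp
    · -- lo < hi
      set m : Nat := (lo + hi) / 2 with hm
      have hmid : PySem.Int.floordiv ((lo : Int) + hi) 2 = (m : Int) := by
        rw [PySem.Int.floordiv_eq_ediv_of_pos (by omega : (0:Int) < 2)]
        omega
      have hlom : lo ≤ m := by omega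
      have hmhi : m < hi := by omega
      have hmlen : m < s.length := lt_of_lt_of_le hmhi hlen
      rw [ValidPair_alt.bs]
      rw [dif_pos (by exact_mod_cast hlt : (lo:Int) < hi)]
      simp only [hmid]
      have hget : PySem.List.pyGet? s ((m : Nat) : Int) = some s[m] := by simp [pysem, hmlen]
      rw [hget]
      by_cases hc : s[m] ≤ x
      · simp only [hc, if_pos]
        have : ((m : Int) + 1) = ((m + 1 : Nat) : Int) := by push_cast; ring
        rw [this, ih (hi - (m+1)) (by omega) (m+1) hi rfl (by omega) hlen]
        -- split Ico lo hi at m+1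
        have hsplit : Finset.Ico lo hi = Finset.Ico lo (m+1) ∪ Finset.Ico (m+1) hi :=
          (Finset.Ico_union_Ico_eq_Ico (by omega) (by omega)).symm
        have hdisj : Disjoint (Finset.Ico lo (m+1)) (Finset.Ico (m+1) hi) := by
          apply Finset.disjoint_left.mpr; intro i h1 h2
          simp only [Finset.mem_Ico] at h1 h2; omega
        rw [hsplit, Finset.filter_union, Finset.card_union_of_disjoint (Finset.disjoint_filter_filter hdisj)]
        have hfull : (Finset.Ico lo (m+1)).filter (fun i => s.getD i 0 ≤ x) = Finset.Ico lo (m+1) := by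
          apply Finset.filter_true_of_mem
          intro i hi'
          simp only [Finset.mem_Ico] at hi'
          calc s.getD i 0 ≤ s.getD m 0 := hM i m (by omega) hmlen
            _ = s[m] := List.getD_eq_getElem s 0 hmlen
            _ ≤ x := hc
        rw [hfull, Nat.card_Ico]
        push_cast
        omega
      · simp only [hc, if_false]
        rw [ih (m - lo) (by omega) lo m rfl (by omega) (by omega)]
        have hsplit : Finset.Ico lo hi = Finset.Ico lo m ∪ Finset.Ico m hi :=
          (Finset.Ico_union_Ico_eq_Ico (by omega) (by omega)).symm
        have hdisj : Disjoint (Finset.Ico lo m) (Finset.Ico m hi) := by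
          apply Finset.disjoint_left.mpr; intro i h1 h2
          simp only [Finset.mem_Ico] at h1 h2; omega
        have hempty : (Finset.Ico m hi).filter (fun i => s.getD i 0 ≤ x) = ∅ := by
          apply Finset.filter_false_of_mem
          intro i hi'
          simp only [Finset.mem_Ico] at hi'
          have : s[m] ≤ s.getD i 0 := by
            rw [← List.getD_eq_getElem s 0 hmlen]
            exact hM m i (by omega) (by omega)
          omega
        rw [hsplit, Finset.filter_union, Finset.card_union_of_disjoint (Finset.disjoint_filter_filter hdisj), hempty]
        simp

lemma pv_foldB_eq (s : List Int) (hM : PVMono s) :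
    ∀ (m : Nat) (ans : Int), m ≤ s.length →
      (List.range m).foldl (fun ans k =>
        match PySem.List.pyGet? s ((k : Nat) : Int) with
        | some x => ans + ((k : Int) - ValidPair_alt.bs s (-x) 0 (k : Int))
        | none => ans) ans
      = ans + ∑ j ∈ Finset.range m, (pvCnt s 0 j : Int) := by
  intro m
  induction m with
  | zero => simp
  | succ m ihm =>
    intro ans hm
    rw [List.range_succ, List.foldl_append, ihm ans (by omega)]
    have hmlen : m < s.length := by omega
    have hget : PySem.List.pyGet? s ((m:Nat) : Int) = some s[m] := by simp [pysem, hmlen]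
    simp only [List.foldl_cons, List.foldl_nil, hget]
    have hbs : ValidPair_alt.bs s (-s[m]) 0 (m : Int) =
        ((0:Nat) : Int) + ((Finset.Ico 0 m).filter (fun i => s.getD i 0 ≤ -s[m])).card := by
      have := pv_bs_eq s hM (-s[m]) m 0 m rfl (by omega) (by omega)
      simpa using this
    rw [hbs]
    have hcompl : ((Finset.Ico 0 m).filter (fun i => s.getD i 0 ≤ -s[m])).card + pvCnt s 0 m = m := by
      unfold pvCnt
      have hgm : s.getD m 0 = s[m] := List.getD_eq_getElem s 0 hmlen
      have h2 : ((Finset.Ico 0 m).filter (fun i => 0 < s.getD i 0 + s.getD m 0))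
          = ((Finset.Ico 0 m).filter (fun i => ¬ (s.getD i 0 ≤ -s[m]))) := by
        apply Finset.filter_congr
        intro i _
        rw [hgm]
        constructor
        · intro h h'; omega
        · intro h; omega
      rw [h2, Finset.card_filter_add_card_filter_not, Nat.card_Ico]
      omega
    rw [Finset.sum_range_succ]
    have h3 : (((Finset.Ico 0 m).filter (fun i => s.getD i 0 ≤ -s[m])).card : Int) + (pvCnt s 0 m : Int) = (m : Int) := by
      exact_mod_cast hcompl
    push_cast
    linarith

-- ===== VERDICT (by name: the statement is the Claim_ definition above) =====
theorem ValidPair_spec : Claim_equal_ValidPair := by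
  unfold Claim_equal_ValidPair
  intro a n _ hpre
  unfold Spec_ValidPair ValidPair ValidPair_alt
  set s := PySem.List.sorted a (fun x => x) false with hs
  have hMono : PVMono s := pv_mono_sorted a
  have hlen : s.length = a.length := PySem.List.length_sorted a _ false
  unfold Pre_ValidPair at hpre
  by_cases hn : n ≤ 0
  · rw [ValidPair.loop, dif_neg (by omega : ¬ ((0:Int) ≤ n - 1))]
    rw [PySem.List.pyRange_one_eq_nil (by omega : n ≤ 0)]
    simp
  · rw [not_le] at hn
    set N := n.toNat with hN
    have hNlen : N ≤ s.length := by omega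
    have hA : ValidPair.loop s 0 (n - 1) 0 = 0 + ((pvTot s 0 (N - 1) : Nat) : Int) := by
      have hcast : (n - 1 : Int) = ((N - 1 : Nat) : Int) := by omega
      have := pv_loopA_eq s hMono (N - 1 - 0) 0 (N - 1) 0 rfl (by omega) (by omega)
      rw [hcast]
      simpa using this
    have hrange : PySem.List.pyRange 0 n 1 = (List.range N).map (Nat.cast : Nat → Int) := by
      have h1 : (n - 0).toNat = N := by omega
      rw [PySem.List.pyRange_one, h1]
      exact List.map_congr_left fun k _ => zero_add _
    rw [hA, hrange, List.foldl_map, pv_foldB_eq s hMono N 0 hNlen]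
    have htot : pvTot s 0 (N - 1) = ∑ j ∈ Finset.range N, pvCnt s 0 j := by
      unfold pvTot
      rw [Finset.range_eq_Ico]
      have : N - 1 + 1 = N := by omega
      rw [this]
    rw [htot]
    push_cast
    ring
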